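-- pv_equiv track=rewrite | github.com/Fhernd/PythonEjercicios | Parte001/ex178_suma_pares_lista.py | suma_pares_diferentes
-- ===== SOURCE A (Python) =====
-- from itertools import combinations
--
-- def suma_pares_diferentes(numeros):
--     """
--     Calcula la suma de pares diferente de una lista.
--     """
--     if isinstance(numeros, list):
--         suma = 0
--
--         for c in combinations(numeros, 2):
--             suma += sum(c)
--
--         return suma
--     else:
--         raise TypeError('El argumento pasado a la función no es una lista.')
-- ===== SOURCE B (Python) =====
-- def suma_pares_diferentes(numeros):
--     """
--     Calcula la suma de pares diferente de una lista.
--     Closed form: each element appears in (n-1) pairs, so the answer is (n-1)*sum.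
--     """
--     if not isinstance(numeros, list):
--         raise TypeError('El argumento pasado a la función no es una lista.')
--     return (len(numeros) - 1) * sum(numeros) if numeros else 0
-- ===== Notes on version B (the rewrite author's own statement) =====
-- stated objective: faster
-- what changed: Replaces the O(n^2) loop over all 2-combinations by the closed form (n-1)*sum(numeros), since each element occurs in exactly n-1 pairs.
import Mathlib
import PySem

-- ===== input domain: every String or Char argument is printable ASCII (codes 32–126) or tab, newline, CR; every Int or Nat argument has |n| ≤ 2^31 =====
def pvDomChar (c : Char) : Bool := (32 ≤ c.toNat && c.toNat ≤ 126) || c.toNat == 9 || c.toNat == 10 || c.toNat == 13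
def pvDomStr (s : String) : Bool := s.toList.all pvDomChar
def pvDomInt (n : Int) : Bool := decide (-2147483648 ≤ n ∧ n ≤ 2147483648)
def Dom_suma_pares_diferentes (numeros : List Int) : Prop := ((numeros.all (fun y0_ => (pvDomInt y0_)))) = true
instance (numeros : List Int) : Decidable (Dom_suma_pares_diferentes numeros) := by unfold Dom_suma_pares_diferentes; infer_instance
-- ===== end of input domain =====

-- B replaces A's O(n^2) loop over all 2-combinations by the closed form (n-1)*sum (faster, asymptotic).

-- ===== PORT A =====
-- A iterates over combinations(numeros, 2) in order, adding sum(c) for each pair;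
-- ported as the standard recursion generating the pairs (x, y) with x before y.
def sumaLoop (numeros : List Int) (suma : Int) : Int :=
  match numeros with
  | [] => suma
  | x :: xs => sumaLoop xs (xs.foldl (fun s y => s + (x + y)) suma)

def suma_pares_diferentes (numeros : List Int) : Int := sumaLoop numeros 0

-- ===== PORT B =====
def suma_pares_diferentes_alt (numeros : List Int) : Int :=
  if numeros ≠ [] then ((numeros.length : Int) - 1) * numeros.foldl (· + ·) 0 else 0

-- ===== PRECONDITION & SPEC =====
def Spec_suma_pares_diferentes (numeros : List Int) (out : Int) : Prop := out = suma_pares_diferentes_alt numeros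
instance (numeros : List Int) (out : Int) : Decidable (Spec_suma_pares_diferentes numeros out) := by unfold Spec_suma_pares_diferentes; infer_instance

-- ===== CLAIM (what is proved, stated in full; the proofs are below) =====
def Claim_equal_suma_pares_diferentes : Prop := ∀ (numeros : List Int), Dom_suma_pares_diferentes numeros → Spec_suma_pares_diferentes numeros (suma_pares_diferentes numeros)

-- ===== LEMMAS AND PROOFS =====

theorem foldl_sum_shift (xs : List Int) (s : Int) :
    xs.foldl (· + ·) s = s + xs.foldl (· + ·) 0 := by
  induction xs generalizing s with
  | nil => simp
  | cons x xs ih => simp only [List.foldl_cons]; rw [ih, ih (0 + x)]; ring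

theorem inner_foldl (x : Int) (xs : List Int) (s : Int) :
    xs.foldl (fun acc y => acc + (x + y)) s
      = s + (xs.length : Int) * x + xs.foldl (· + ·) 0 := by
  induction xs generalizing s with
  | nil => simp
  | cons z zs ih =>
      simp only [List.foldl_cons, ih, List.length_cons]
      rw [foldl_sum_shift zs (0 + z)]
      push_cast; ring

theorem sumaLoop_shift (xs : List Int) (s : Int) :
    sumaLoop xs s = s + sumaLoop xs 0 := by
  induction xs generalizing s with
  | nil => simp [sumaLoop]
  | cons x xs ih =>
      simp only [sumaLoop]
      rw [inner_foldl, inner_foldl, ih, ih ((0 : Int) + _ + _)]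
      ring

theorem sumaLoop_closed (xs : List Int) :
    sumaLoop xs 0 = ((xs.length : Int) - 1) * xs.foldl (· + ·) 0 ∨ xs = [] := by
  induction xs with
  | nil => right; rfl
  | cons x xs ih =>
      left
      simp only [sumaLoop]
      rw [sumaLoop_shift, inner_foldl]
      rcases ih with h | h
      · rw [h, List.foldl_cons, foldl_sum_shift xs (0 + x)]
        simp only [List.length_cons]
        push_cast; ring
      · subst h; simp [sumaLoop]

-- ===== VERDICT (by name: the statement is the Claim_ definition above) =====
theorem suma_pares_diferentes_spec : Claim_equal_suma_pares_diferentes := by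
  intro numeros _
  unfold Spec_suma_pares_diferentes suma_pares_diferentes suma_pares_diferentes_alt
  rcases sumaLoop_closed numeros with h | h
  · rw [h]
    split <;> simp_all
  · subst h; simp [sumaLoop]
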